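-- pv_equiv track=rewrite | github.com/johannespaju/2024-fall-python | EXAM/exam01/exam.py | mark_double_symbols
-- ===== SOURCE A (Python) =====
-- def mark_double_symbols(text: str) -> str:
--     """
--     Mark double symbols in a string.
--
--     If there are two consecutive symbols which are the same, then mark it by replacing the second one with "2".
--     For example: "aabbc" => "a2b2c"
--     After the pair, counting restarts. So "aaa" => "a2a", "aaaa" => "a2a2", "aaaaa" => "a2a2a".
--
--     :param text: Input text to be checked.
--     :return: Result where the double symbols are "marked".
--     """
--     result = ""
--     previous_char = ""
--     for char in text:
--         if char == previous_char:
--             result += "2"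
--             previous_char = ""
--         else:
--             result += char
--             previous_char = char
--
--     return result
-- ===== SOURCE B (Python) =====
-- def mark_double_symbols(text: str) -> str:
--     """Run-based rewrite: split text into maximal runs, expand each run with a closed form."""
--     pieces = []
--     i = 0
--     n = len(text)
--     while i < n:
--         j = i
--         while j < n and text[j] == text[i]:
--             j += 1
--         run = j - i
--         c = text[i]
--         pieces.append((c + "2") * (run // 2) + c * (run % 2))
--         i = j
--     return "".join(pieces)
-- ===== Notes on version B (the rewrite author's own statement) =====
-- stated objective: alternative
-- what changed: Replaces the char-by-char reset state machine with a run-decomposition: scan maximal runs of identical characters and expand each run of length n as (c+'2')*(n//2)+c*(n%2), joining the pieces.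
import Mathlib
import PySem

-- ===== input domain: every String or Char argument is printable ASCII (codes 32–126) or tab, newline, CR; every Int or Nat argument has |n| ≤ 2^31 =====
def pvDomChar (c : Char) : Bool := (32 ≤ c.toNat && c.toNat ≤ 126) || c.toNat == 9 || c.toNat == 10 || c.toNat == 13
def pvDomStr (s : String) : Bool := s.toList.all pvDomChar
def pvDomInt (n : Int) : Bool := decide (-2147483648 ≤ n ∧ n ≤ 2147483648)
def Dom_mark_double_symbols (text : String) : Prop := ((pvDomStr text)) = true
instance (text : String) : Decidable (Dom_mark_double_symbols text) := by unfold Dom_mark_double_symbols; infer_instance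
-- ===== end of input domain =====

-- B replaces A's char-by-char reset state machine with a run decomposition plus a closed-form
-- expansion of each run; same O(n) cost (objective: alternative).

-- ===== PORT A =====
-- A's loop: result/previous_char accumulator; previous_char = "" is modelled as none.
def mark_double_symbols (text : String) : String :=
  String.mk
    ((text.toList.foldl
        (fun (st : List Char × Option Char) char =>
          if some char = st.2 then (st.1 ++ ['2'], none)
          else (st.1 ++ [char], some char))
        ([], none)).1)

-- ===== PORT B =====
-- inner while loop of Source B: count the leading run of c, return (run length, remainder)
def mdsTakeRun (c : Char) : List Char → Nat × List Char
  | [] => (0, [])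
  | d :: ds => if d = c then let p := mdsTakeRun c ds; (p.1 + 1, p.2) else (0, d :: ds)

theorem mdsTakeRun_len_le (c : Char) : ∀ (l : List Char), (mdsTakeRun c l).2.length ≤ l.length := by
  intro l
  induction l with
  | nil => simp [mdsTakeRun]
  | cons d ds ih =>
      simp only [mdsTakeRun]
      split <;> simp <;> omega

-- outer while loop of Source B: the list of maximal runs (char, length)
def mdsRuns : List Char → List (Char × Nat)
  | [] => []
  | c :: cs =>
      let p := mdsTakeRun c cs
      (c, p.1 + 1) :: mdsRuns p.2
termination_by l => l.length
decreasing_by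
  have := mdsTakeRun_len_le c cs
  simp; omega

-- per-run piece (c + "2") * (n // 2) + c * (n % 2)
def mdsExpand (c : Char) (n : Nat) : List Char :=
  (List.replicate (n / 2) [c, '2']).flatten ++ List.replicate (n % 2) c

def mark_double_symbols_alt (text : String) : String :=
  String.mk ((mdsRuns text.toList).flatMap (fun cn => mdsExpand cn.1 cn.2))

-- ===== PRECONDITION & SPEC =====
def Spec_mark_double_symbols (text : String) (out : String) : Prop := out = mark_double_symbols_alt text
instance (text : String) (out : String) : Decidable (Spec_mark_double_symbols text out) := by unfold Spec_mark_double_symbols; infer_instance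

-- ===== CLAIM (what is proved, stated in full; the proofs are below) =====
def Claim_equal_mark_double_symbols : Prop := ∀ (text : String), Dom_mark_double_symbols text → Spec_mark_double_symbols text (mark_double_symbols text)

-- ===== LEMMAS AND PROOFS =====

-- recursive rendering of A's loop
def mdsF : List Char → Option Char → List Char
  | [], _ => []
  | c :: rest, p => if some c = p then '2' :: mdsF rest none else c :: mdsF rest (some c)

theorem mdsFold_eq_mdsF (l : List Char) : ∀ (acc : List Char) (p : Option Char),
    (l.foldl
        (fun (st : List Char × Option Char) char =>
          if some char = st.2 then (st.1 ++ ['2'], none)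
          else (st.1 ++ [char], some char))
        (acc, p)).1 = acc ++ mdsF l p := by
  induction l with
  | nil => intro acc p; simp [mdsF]
  | cons c rest ih =>
      intro acc p
      simp only [List.foldl_cons, mdsF]
      by_cases h : some c = p
      · simp [h, ih]
      · simp [h, ih]

def mdsPrevAfter (c : Char) (n : Nat) : Option Char :=
  if n % 2 = 1 then some c else none

theorem mdsF_run (c : Char) : ∀ (n : Nat) (rest : List Char),
    (mdsF (List.replicate n c ++ rest) none = mdsExpand c n ++ mdsF rest (mdsPrevAfter c n)) ∧
    (mdsF (List.replicate n c ++ rest) (some c) =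
      if n = 0 then mdsF rest (some c)
      else '2' :: (mdsExpand c (n - 1) ++ mdsF rest (mdsPrevAfter c (n - 1)))) := by
  intro n
  induction n with
  | zero => intro rest; simp [mdsExpand, mdsPrevAfter]
  | succ m ih =>
      intro rest
      constructor
      · -- from none: first char differs from none
        have h2 := (ih rest).2
        simp only [List.replicate_succ, List.cons_append, mdsF, reduceCtorEq, if_false]
        rw [h2]
        by_cases hm : m = 0
        · subst hm; simp [mdsExpand, mdsPrevAfter]
        · obtain ⟨k, rfl⟩ := Nat.exists_eq_succ_of_ne_zero hm
          have hdiv : (k + 1 + 1) / 2 = k / 2 + 1 := by omega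
          have hmod : (k + 1 + 1) % 2 = k % 2 := by omega
          simp only [if_neg hm, Nat.succ_sub_one, mdsExpand, mdsPrevAfter, hdiv, hmod,
            List.replicate_succ, List.flatten_cons]
          simp
          split <;> rfl
      · -- from some c: first char matches
        have h1 := (ih rest).1
        simp only [List.replicate_succ, List.cons_append, mdsF]
        rw [h1]
        simp
  
theorem mdsTakeRun_decomp (c : Char) : ∀ (l : List Char),
    l = List.replicate (mdsTakeRun c l).1 c ++ (mdsTakeRun c l).2 ∧
    (∀ d, (mdsTakeRun c l).2.head? = some d → d ≠ c) := by
  intro l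
  induction l with
  | nil => simp [mdsTakeRun]
  | cons d ds ih =>
      simp only [mdsTakeRun]
      by_cases h : d = c
      · subst h
        simp only [if_pos rfl]
        constructor
        · conv_lhs => rw [ih.1]
          simp [List.replicate_succ]
        · exact ih.2
      · simp only [if_neg h]
        constructor
        · simp
        · intro e he
          simp at he
          exact he ▸ h

theorem mdsF_head_neq (p : Char) : ∀ (l : List Char),
    (∀ d, l.head? = some d → d ≠ p) → mdsF l (some p) = mdsF l none := by
  intro l h
  cases l with
  | nil => rfl
  | cons c rest =>
      have hc : ¬ (some c = some p) := by
        simpa using h c (by simp)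
      simp [mdsF, hc]

theorem mdsF_eq_runs_aux : ∀ (n : Nat) (l : List Char), l.length ≤ n →
    mdsF l none = (mdsRuns l).flatMap (fun cn => mdsExpand cn.1 cn.2) := by
  intro n
  induction n with
  | zero =>
      intro l hl
      have : l = [] := List.eq_nil_of_length_eq_zero (Nat.le_zero.mp hl)
      subst this
      simp [mdsF, mdsRuns]
  | succ m ih =>
      intro l hl
      cases l with
      | nil => simp [mdsF, mdsRuns]
      | cons c cs =>
          obtain ⟨hdec, hhd⟩ := mdsTakeRun_decomp c cs
          have hrun := (mdsF_run c ((mdsTakeRun c cs).1 + 1) (mdsTakeRun c cs).2).1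
          have hstep : mdsF (c :: cs) none =
              mdsF (List.replicate ((mdsTakeRun c cs).1 + 1) c ++ (mdsTakeRun c cs).2) none := by
            rw [List.replicate_succ, List.cons_append, ← hdec]
          rw [hstep, hrun]
          have hrest : mdsF (mdsTakeRun c cs).2 (mdsPrevAfter c ((mdsTakeRun c cs).1 + 1)) =
              mdsF (mdsTakeRun c cs).2 none := by
            unfold mdsPrevAfter
            split
            · exact mdsF_head_neq c _ hhd
            · rfl
          have hlen : (mdsTakeRun c cs).2.length ≤ m := by
            have := mdsTakeRun_len_le c cs
            simp at hl
            omega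
          rw [hrest, ih _ hlen]
          conv_rhs => rw [mdsRuns]
          simp

theorem mdsF_eq_runs (l : List Char) :
    mdsF l none = (mdsRuns l).flatMap (fun cn => mdsExpand cn.1 cn.2) :=
  mdsF_eq_runs_aux l.length l (Nat.le_refl _)

-- ===== VERDICT (by name: the statement is the Claim_ definition above) =====
theorem mark_double_symbols_spec : Claim_equal_mark_double_symbols := by
  intro text _
  unfold Spec_mark_double_symbols mark_double_symbols mark_double_symbols_alt
  rw [mdsFold_eq_mdsF, mdsF_eq_runs]
  simp
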